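-- pv_equiv track=rewrite | github.com/adenmao1202/Solved_problems | Final/FinalPrac.py/collatz.py | sum_digits_cycle
-- ===== SOURCE A (Python) =====
-- def sum_digits_cycle(n):
--     # process val
--     def sum_digits(n: int):
--         return sum(int(digit) for digit in str(n))
--
--
--     # count iterations
--     iterations = 0
--     while int(n) >= 10:    #只有大於10的數才會iterate
--         n = sum_digits(n)  # n: int
--         iterations += 1
--     return iterations      # 如果while結束就會跳出來，個位數就return
-- ===== SOURCE B (Python) =====
-- def sum_digits_cycle(n):
--     # arithmetic digit sum (no string conversion), recursive on m // 10
--     def digit_sum(m):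
--         return 0 if m == 0 else m % 10 + digit_sum(m // 10)
--     # recursion over the counting recurrence instead of a while-loop
--     n = int(n)
--     if n < 10:
--         return 0
--     return 1 + sum_digits_cycle(digit_sum(n))
-- ===== Notes on version B (the rewrite author's own statement) =====
-- stated objective: alternative
-- what changed: B computes each digit sum arithmetically by recursion on m // 10 instead of converting to a string and parsing each character back to an int, and replaces the counting while-loop with a direct recursion on the same recurrence.
import Mathlib
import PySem

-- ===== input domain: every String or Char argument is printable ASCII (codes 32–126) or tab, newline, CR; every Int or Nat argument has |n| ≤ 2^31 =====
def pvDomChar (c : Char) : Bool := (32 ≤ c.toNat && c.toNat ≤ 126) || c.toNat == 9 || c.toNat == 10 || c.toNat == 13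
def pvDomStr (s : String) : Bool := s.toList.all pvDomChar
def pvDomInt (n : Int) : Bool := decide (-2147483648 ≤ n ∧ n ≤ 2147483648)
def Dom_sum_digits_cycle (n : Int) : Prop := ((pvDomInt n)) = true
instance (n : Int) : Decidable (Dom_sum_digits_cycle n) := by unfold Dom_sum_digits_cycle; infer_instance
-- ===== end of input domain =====

-- B computes digit sums arithmetically by recursion on m // 10 instead of via the decimal
-- string, and replaces A's counting while-loop with a direct recursion (alternative; same cost).


-- ===== PORT A =====
-- sum(int(digit) for digit in str(n)); int(digit) via PySem.Int.ofStr? on the one-char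
-- string, exact here: the loop only applies it to multi-digit nonnegative values.
def pvSumDigits (n : Int) : Int :=
  ((PySem.Int.toStr n).toList.map (fun c => (PySem.Int.ofStr? (String.ofList [c])).getD 0)).sum

-- while int(n) >= 10: n = sum_digits(n); iterations += 1   (int(n) = n on an Int argument).
-- Fuel only makes the loop total; n.toNat + 1 steps are more than the loop ever takes.
def sum_digits_cycle_go (fuel : Nat) (n iterations : Int) : Int :=
  match fuel with
  | 0 => iterations
  | f + 1 => if 10 ≤ n then sum_digits_cycle_go f (pvSumDigits n) (iterations + 1) else iterations

def sum_digits_cycle (n : Int) : Int := sum_digits_cycle_go (n.toNat + 1) n 0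

-- ===== PORT B =====
-- digit_sum(m) = 0 if m == 0 else m % 10 + digit_sum(m // 10); Python's % and // are
-- fmod/fdiv. Fuel only makes it total (m.toNat + 1 exceeds the recursion depth for m ≥ 0).
def pvArithDigitSum (fuel : Nat) (m : Int) : Int :=
  match fuel with
  | 0 => 0
  | f + 1 => if m = 0 then 0
             else PySem.Int.mod m 10 + pvArithDigitSum f (PySem.Int.floordiv m 10)

-- if n < 10: return 0; return 1 + sum_digits_cycle(digit_sum(n)) — same fuel guard.
def sum_digits_cycle_alt_go (fuel : Nat) (n : Int) : Int :=
  if n < 10 then 0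
  else match fuel with
    | 0 => 0
    | f + 1 => 1 + sum_digits_cycle_alt_go f (pvArithDigitSum (n.toNat + 1) n)

def sum_digits_cycle_alt (n : Int) : Int := sum_digits_cycle_alt_go (n.toNat + 1) n

-- ===== PRECONDITION & SPEC =====
def Spec_sum_digits_cycle (n : Int) (out : Int) : Prop := out = sum_digits_cycle_alt n
instance (n : Int) (out : Int) : Decidable (Spec_sum_digits_cycle n out) := by unfold Spec_sum_digits_cycle; infer_instance

-- ===== CLAIM =====
def Claim_equal_sum_digits_cycle : Prop := ∀ (n : Int), Dom_sum_digits_cycle n → Spec_sum_digits_cycle n (sum_digits_cycle n)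

-- ===== LEMMAS AND PROOFS =====
theorem charVal_digitChar (d : Nat) (h : d < 10) :
    (PySem.Int.ofStr? (String.ofList [Nat.digitChar d])).getD 0 = (d : Int) := by
  interval_cases d <;> decide

theorem pyMod_cast (n : Nat) : PySem.Int.mod (n : Int) 10 = ((n % 10 : Nat) : Int) := by
  simp [PySem.Int.mod, Int.fmod_eq_emod]

theorem pyDiv_cast (n : Nat) : PySem.Int.floordiv (n : Int) 10 = ((n / 10 : Nat) : Int) := by
  simp [PySem.Int.floordiv, Int.fdiv_eq_ediv]

theorem toDigitsCore_acc (b f : Nat) : ∀ (n : Nat) (acc : List Char),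
    Nat.toDigitsCore b f n acc = Nat.toDigitsCore b f n [] ++ acc := by
  induction f with
  | zero => intro n acc; simp [Nat.toDigitsCore]
  | succ f ih =>
    intro n acc
    simp only [Nat.toDigitsCore]
    by_cases h : n / b = 0
    · simp [h]
    · simp only [h, if_false]
      rw [ih (n / b) (Nat.digitChar (n % b) :: acc), ih (n / b) [Nat.digitChar (n % b)],
        List.append_assoc]
      rfl

-- string digit-sum of Nat.toDigitsCore equals B's arithmetic digit sum
theorem key (f : Nat) : ∀ (g n : Nat), n < f → n < g →
    ((Nat.toDigitsCore 10 f n []).map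
        (fun c => (PySem.Int.ofStr? (String.ofList [c])).getD 0)).sum
      = pvArithDigitSum g (n : Int) := by
  induction f with
  | zero => intro g n h; omega
  | succ f ih =>
    intro g n hf hg
    obtain ⟨g', rfl⟩ : ∃ g', g = g' + 1 := ⟨g - 1, by omega⟩
    simp only [Nat.toDigitsCore, pvArithDigitSum]
    by_cases h0 : n / 10 = 0
    · have hn : n < 10 := by omega
      simp only [h0, if_true, List.map, List.sum_cons, List.sum_nil,
        charVal_digitChar (n % 10) (Nat.mod_lt _ (by omega))]
      by_cases hz : (n : Int) = 0
      · have : n = 0 := by omega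
        subst this; simp
      · rw [if_neg hz, pyMod_cast, pyDiv_cast, h0]
        cases g' <;> simp [pvArithDigitSum]
    · have hn10 : 10 ≤ n := by
        by_contra h; exact h0 (Nat.div_eq_of_lt (by omega))
      simp only [h0, if_false]
      rw [toDigitsCore_acc, List.map_append, List.sum_append]
      have hz : ¬ ((n : Int) = 0) := by omega
      rw [if_neg hz, pyMod_cast, pyDiv_cast]
      have hd1 : n / 10 < f := by
        have := Nat.div_lt_self (by omega : 0 < n) (by omega : 1 < 10); omega
      have hd2 : n / 10 < g' := by
        have := Nat.div_lt_self (by omega : 0 < n) (by omega : 1 < 10); omega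
      rw [ih g' (n / 10) hd1 hd2]
      simp only [List.map_cons, List.map_nil, List.sum_cons, List.sum_nil,
        charVal_digitChar (n % 10) (Nat.mod_lt _ (by omega))]
      omega

-- for 0 ≤ n, A's string digit sum equals B's arithmetic digit sum
theorem pvSumDigits_eq_arith (n : Int) (hn : 0 ≤ n) :
    pvSumDigits n = pvArithDigitSum (n.toNat + 1) n := by
  unfold pvSumDigits
  rw [PySem.Int.toList_toStr]
  have hneg : ¬ n < 0 := by omega
  have := key (n.toNat + 1) (n.toNat + 1) n.toNat (by omega) (by omega)
  rw [Int.toNat_of_nonneg hn] at this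
  simpa [PySem.Int.toChars, hneg] using this

theorem go_eq_alt_go (fuel : Nat) : ∀ (n k : Int),
    sum_digits_cycle_go fuel n k = k + sum_digits_cycle_alt_go fuel n := by
  induction fuel with
  | zero =>
    intro n k
    simp only [sum_digits_cycle_go, sum_digits_cycle_alt_go]
    split_ifs <;> omega
  | succ f ih =>
    intro n k
    simp only [sum_digits_cycle_go, sum_digits_cycle_alt_go]
    by_cases h : 10 ≤ n
    · rw [if_pos h, if_neg (by omega), pvSumDigits_eq_arith n (by omega), ih]
      ring
    · rw [if_neg h, if_pos (by omega)]
      omega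

-- ===== VERDICT =====
theorem sum_digits_cycle_spec : Claim_equal_sum_digits_cycle := by
  intro n _
  show sum_digits_cycle n = sum_digits_cycle_alt n
  unfold sum_digits_cycle sum_digits_cycle_alt
  rw [go_eq_alt_go]
  omega
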